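-- pv_equiv track=rewrite | github.com/opita04/resonantos-alpha | dashboard/server_bounty_routes.py | _tribe_counts_for_bounties
-- ===== SOURCE A (Python) =====
-- def _tribe_counts_for_bounties(bounties):
--     counts = {}
--     for b in bounties:
--         tribe_id = b.get("tribeId")
--         if not tribe_id:
--             continue
--         item = counts.setdefault(tribe_id, {"active": 0, "total": 0})
--         item["total"] += 1
--         if b.get("status") != "rewarded":
--             item["active"] += 1
--     return counts
-- ===== SOURCE B (Python) =====
-- def _tribe_counts_for_bounties(bounties):
--     totals = {}
--     for b in bounties:
--         tribe_id = b.get("tribeId")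
--         if not tribe_id:
--             continue
--         totals[tribe_id] = totals.get(tribe_id, 0) + 1
--     actives = {}
--     for b in bounties:
--         tribe_id = b.get("tribeId")
--         if not tribe_id:
--             continue
--         if b.get("status") != "rewarded":
--             actives[tribe_id] = actives.get(tribe_id, 0) + 1
--     return {t: {"active": actives.get(t, 0), "total": n} for t, n in totals.items()}
-- ===== Notes on version B (the rewrite author's own statement) =====
-- stated objective: alternative
-- what changed: Replaces A's single loop that mutates nested per-tribe dicts via setdefault with two independent filtered counting passes (totals and actives tables) merged in a final comprehension over totals.
import Mathlib
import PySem

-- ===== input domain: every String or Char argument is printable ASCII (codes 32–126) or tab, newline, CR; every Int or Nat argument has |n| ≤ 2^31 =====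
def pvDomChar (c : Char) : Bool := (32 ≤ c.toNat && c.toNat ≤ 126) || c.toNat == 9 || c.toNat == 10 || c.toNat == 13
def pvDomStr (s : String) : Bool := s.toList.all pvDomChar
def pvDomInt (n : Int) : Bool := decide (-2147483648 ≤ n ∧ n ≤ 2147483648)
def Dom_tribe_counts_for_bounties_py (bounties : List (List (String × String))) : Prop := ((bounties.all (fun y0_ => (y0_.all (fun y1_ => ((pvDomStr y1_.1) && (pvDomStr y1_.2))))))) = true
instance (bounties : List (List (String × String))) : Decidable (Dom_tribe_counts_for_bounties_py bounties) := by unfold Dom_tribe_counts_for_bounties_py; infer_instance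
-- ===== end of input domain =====

-- B replaces A's single loop mutating nested per-tribe dicts with two independent
-- filtered counting passes (totals and actives) merged in a final pass (alternative decomposition).

-- ===== PORT A =====
-- A: one loop; counts[tid] = {"active","total"} created by setdefault and mutated in place.
def tribe_counts_for_bounties_py (bounties : List (List (String × String))) : List (String × List (String × Int)) :=
  let counts : PySem.Dict String (PySem.Dict String Int) :=
    bounties.foldl (fun counts b =>
      let bd : PySem.Dict String String := PySem.Dict.mk b
      match bd.get? "tribeId" with
      | none => counts
      | some tid =>
        if tid = "" then counts
        else
          let item0 : PySem.Dict String Int := PySem.Dict.mk [("active", 0), ("total", 0)]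
          let counts1 := counts.setdefault tid item0
          let counts2 := counts1.modify tid item0 (fun item => item.modify "total" 0 (· + 1))
          if bd.get? "status" ≠ some "rewarded" then
            counts2.modify tid item0 (fun item => item.modify "active" 0 (· + 1))
          else counts2) PySem.Dict.empty
  counts.items.map (fun p => (p.1, p.2.items))

-- ===== PORT B =====
-- B: pass 1 counts totals per tribe, pass 2 counts actives per tribe, final pass merges over totals.
def tribe_counts_for_bounties_py_alt (bounties : List (List (String × String))) : List (String × List (String × Int)) :=
  let totals : PySem.Dict String Int :=
    bounties.foldl (fun totals b =>
      match (PySem.Dict.mk b : PySem.Dict String String).get? "tribeId" with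
      | none => totals
      | some tid => if tid = "" then totals else totals.insert tid (totals.getD tid 0 + 1))
      PySem.Dict.empty
  let actives : PySem.Dict String Int :=
    bounties.foldl (fun actives b =>
      let bd : PySem.Dict String String := PySem.Dict.mk b
      match bd.get? "tribeId" with
      | none => actives
      | some tid =>
        if tid = "" then actives
        else if bd.get? "status" ≠ some "rewarded" then actives.insert tid (actives.getD tid 0 + 1)
        else actives)
      PySem.Dict.empty
  totals.items.map (fun p => (p.1, [("active", actives.getD p.1 0), ("total", p.2)]))

-- ===== PRECONDITION & SPEC =====
def Spec_tribe_counts_for_bounties_py (bounties : List (List (String × String))) (out : List (String × List (String × Int))) : Prop := out = tribe_counts_for_bounties_py_alt bounties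
instance (bounties : List (List (String × String))) (out : List (String × List (String × Int))) : Decidable (Spec_tribe_counts_for_bounties_py bounties out) := by unfold Spec_tribe_counts_for_bounties_py; infer_instance

-- ===== CLAIM (what is proved, stated in full; the proofs are below) =====
def Claim_equal_tribe_counts_for_bounties_py : Prop := ∀ (bounties : List (List (String × String))), Dom_tribe_counts_for_bounties_py bounties → Spec_tribe_counts_for_bounties_py bounties (tribe_counts_for_bounties_py bounties)

-- ===== LEMMAS AND PROOFS =====

def pvKeyOf (b : List (String × String)) : Option String :=
  match (PySem.Dict.mk b : PySem.Dict String String).get? "tribeId" with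
  | none => none
  | some t => if t = "" then none else some t
def pvAct (b : List (String × String)) : Bool :=
  decide ((PySem.Dict.mk b : PySem.Dict String String).get? "status" ≠ some "rewarded")
def pvTids (bounties : List (List (String × String))) : List String := bounties.filterMap pvKeyOf
def pvAtids (bounties : List (List (String × String))) : List String :=
  bounties.filterMap (fun b => match pvKeyOf b with
    | none => none
    | some t => if pvAct b then some t else none)
theorem pv_modify_total (a c : Int) :
    (PySem.Dict.mk [("active",a),("total",c)]).modify "total" 0 (· + 1) = PySem.Dict.mk [("active",a),("total",c+1)] := by
  simp [PySem.Dict.modify, PySem.Dict.insert, PySem.Dict.getD, PySem.Dict.get?, PySem.Dict.contains]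
theorem pv_modify_active (a c : Int) :
    (PySem.Dict.mk [("active",a),("total",c)]).modify "active" 0 (· + 1) = PySem.Dict.mk [("active",a+1),("total",c)] := by
  simp [PySem.Dict.modify, PySem.Dict.insert, PySem.Dict.getD, PySem.Dict.get?, PySem.Dict.contains]

theorem pv_modify_eq {κ ν : Type} [BEq κ] (d : PySem.Dict κ ν) (k : κ) (d0 : ν) (f : ν → ν) :
    d.modify k d0 f = d.insert k (f (d.getD k d0)) := rfl

theorem pv_atids_subset (bs : List (List (String × String))) (x : String) (hx : x ∈ pvAtids bs) : x ∈ pvTids bs := by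
  simp only [pvAtids, List.mem_filterMap] at hx
  obtain ⟨b, hb, he⟩ := hx
  simp only [pvTids, List.mem_filterMap]
  refine ⟨b, hb, ?_⟩
  cases hk : pvKeyOf b with
  | none => rw [hk] at he; simp at he
  | some t =>
    rw [hk] at he
    by_cases ha : pvAct b
    · simp only [ha, if_true] at he; exact he
    · simp [ha] at he

def pvF (bs : List (List (String × String))) : String → String × PySem.Dict String Int :=
  fun t => (t, PySem.Dict.mk [("active", ((pvAtids bs).count t : Int)), ("total", ((pvTids bs).count t : Int))])

theorem pv_A_counts_char (bounties : List (List (String × String))) :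
    bounties.foldl (fun counts b =>
      let bd : PySem.Dict String String := PySem.Dict.mk b
      match bd.get? "tribeId" with
      | none => counts
      | some tid =>
        if tid = "" then counts
        else
          let item0 : PySem.Dict String Int := PySem.Dict.mk [("active", 0), ("total", 0)]
          let counts1 := counts.setdefault tid item0
          let counts2 := counts1.modify tid item0 (fun item => item.modify "total" 0 (· + 1))
          if bd.get? "status" ≠ some "rewarded" then
            counts2.modify tid item0 (fun item => item.modify "active" 0 (· + 1))
          else counts2) (PySem.Dict.empty : PySem.Dict String (PySem.Dict String Int))
    = PySem.Dict.mk ((PySem.Set.ofList (pvTids bounties)).map (pvF bounties)) := by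
  induction bounties using List.reverseRecOn with
  | nil => rfl
  | append_singleton bs b ih =>
    rw [List.foldl_append, List.foldl_cons, List.foldl_nil, ih]
    have hT : pvTids (bs ++ [b]) = pvTids bs ++ (pvKeyOf b).toList := by
      cases hk : pvKeyOf b <;> simp [pvTids, List.filterMap_append, hk]
    have hA : pvAtids (bs ++ [b]) = pvAtids bs ++ (match pvKeyOf b with
        | none => none
        | some t => if pvAct b then some t else none).toList := by
      cases hk : pvKeyOf b with
      | none => simp [pvAtids, List.filterMap_append, hk]
      | some t => by_cases ha : pvAct b <;> simp [pvAtids, List.filterMap_append, hk, ha]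
    set S := PySem.Set.ofList (pvTids bs) with hS
    set f := pvF bs with hf
    set D := PySem.Dict.mk (S.map f) with hD
    have hkeys : D.keys = S := by
      have hid : ((fun x : String × PySem.Dict String Int => x.1) ∘ pvF bs) = id := by
        funext t; rfl
      simp only [hD, PySem.Dict.keys, PySem.Dict.items, List.map_map, hf]
      rw [hid, List.map_id]
    have hnodup : D.keys.Nodup := by rw [hkeys]; exact PySem.Set.nodup_ofList _
    cases hk : pvKeyOf b with
    | none =>
      have hT' : pvTids (bs ++ [b]) = pvTids bs := by simp [hT, hk]
      have hA' : pvAtids (bs ++ [b]) = pvAtids bs := by rw [hA, hk]; simp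
      have hstep : ∀ (d : PySem.Dict String (PySem.Dict String Int)),
          (let bd : PySem.Dict String String := PySem.Dict.mk b
           match bd.get? "tribeId" with
           | none => d
           | some tid =>
             if tid = "" then d
             else
               let item0 : PySem.Dict String Int := PySem.Dict.mk [("active", 0), ("total", 0)]
               let counts1 := d.setdefault tid item0
               let counts2 := counts1.modify tid item0 (fun item => item.modify "total" 0 (· + 1))
               if bd.get? "status" ≠ some "rewarded" then
                 counts2.modify tid item0 (fun item => item.modify "active" 0 (· + 1))
               else counts2) = d := by
        intro d
        unfold pvKeyOf at hk
        cases hg : (PySem.Dict.mk b : PySem.Dict String String).get? "tribeId" with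
        | none => simp [hg]
        | some u =>
          rw [hg] at hk
          change (if u = "" then none else some u) = none at hk
          by_cases hu : u = ""
          · simp [hg, hu]
          · rw [if_neg hu] at hk; simp at hk
      rw [hstep]
      have : pvF (bs ++ [b]) = pvF bs := by
        funext t; simp [pvF, hT', hA']
      rw [hT', this]
    | some t =>
      -- b contributes tribe t
      obtain ⟨hg, htne⟩ : (PySem.Dict.mk b : PySem.Dict String String).get? "tribeId" = some t ∧ t ≠ "" := by
        unfold pvKeyOf at hk
        cases hg : (PySem.Dict.mk b : PySem.Dict String String).get? "tribeId" with
        | none => rw [hg] at hk; simp at hk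
        | some u =>
          rw [hg] at hk
          change (if u = "" then none else some u) = some t at hk
          by_cases hu : u = ""
          · rw [if_pos hu] at hk; simp at hk
          · rw [if_neg hu] at hk
            simp only [Option.some.injEq] at hk
            subst hk; exact ⟨rfl, hu⟩
      have hT' : pvTids (bs ++ [b]) = pvTids bs ++ [t] := by simp [hT, hk]
      have hA' : pvAtids (bs ++ [b]) = pvAtids bs ++ (if pvAct b then [t] else []) := by
        rw [hA, hk]; by_cases ha : pvAct b <;> simp [ha]
      by_cases hmem : t ∈ S
      · -- tribe already seen
        have hcont : D.contains t = true := by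
          rw [PySem.Dict.contains_iff_mem_keys, hkeys]; exact hmem
        have hget : D.getD t (PySem.Dict.mk [("active",0),("total",0)]) =
            PySem.Dict.mk [("active", ((pvAtids bs).count t : Int)), ("total", ((pvTids bs).count t : Int))] := by
          exact PySem.Dict.getD_of_mem_items D (List.mem_map_of_mem hmem) hnodup _
        simp only [hg, if_neg htne]
        rw [PySem.Dict.setdefault_of_contains D _ hcont]
        have h2 : D.modify t (PySem.Dict.mk [("active",0),("total",0)]) (fun item => item.modify "total" 0 (· + 1)) =
            D.insert t (PySem.Dict.mk [("active", ((pvAtids bs).count t : Int)), ("total", ((pvTids bs).count t : Int) + 1)]) := by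
          rw [pv_modify_eq, hget]
          simp only [pv_modify_total]
        rw [h2]
        by_cases hact : (PySem.Dict.mk b : PySem.Dict String String).get? "status" = some "rewarded"
        · rw [if_neg (by simp [hact])]
          have hactb : pvAct b = false := by simp [pvAct, hact]
          rw [hT', PySem.Set.ofList_append_singleton, PySem.Set.add_of_mem hmem]
          apply PySem.Dict.ext
          rw [PySem.Dict.items_insert_of_contains D _ hcont]
          show ((S.map f).map _) = _
          rw [List.map_map]
          apply List.map_congr_left
          intro x hx
          by_cases hxt : x = t
          · subst hxt
            simp only [Function.comp, hf, pvF, beq_self_eq_true, if_true]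
            rw [hT', hA', hactb]
            simp [List.count_append]
          · simp only [Function.comp, hf, pvF]
            rw [if_neg (fun h => hxt (beq_iff_eq.mp h))]
            rw [hT', hA', hactb]
            simp [List.count_append, List.count_cons, Ne.symm hxt]
        · rw [if_pos (by simp [hact])]
          rw [pv_modify_eq, PySem.Dict.getD_insert_self]
          simp only [pv_modify_active]
          rw [PySem.Dict.insert_insert_self]
          have hactb : pvAct b = true := by simp [pvAct, hact]
          rw [hT', PySem.Set.ofList_append_singleton, PySem.Set.add_of_mem hmem]
          apply PySem.Dict.ext
          rw [PySem.Dict.items_insert_of_contains D _ hcont]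
          show ((S.map f).map _) = _
          rw [List.map_map]
          apply List.map_congr_left
          intro x hx
          by_cases hxt : x = t
          · subst hxt
            simp only [Function.comp, hf, pvF, beq_self_eq_true, if_true]
            rw [hT', hA', hactb]
            simp [List.count_append]
          · simp only [Function.comp, hf, pvF]
            rw [if_neg (fun h => hxt (beq_iff_eq.mp h))]
            rw [hT', hA', hactb]
            simp [List.count_append, List.count_cons, Ne.symm hxt]
      · -- fresh tribe
        have hnotin_t : t ∉ pvTids bs := fun h => hmem ((PySem.Set.mem_ofList _ _).mpr h)
        have hnotin_at : t ∉ pvAtids bs := fun h => hnotin_t (pv_atids_subset bs t h)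
        have hcont : D.contains t = false := by
          cases h : D.contains t with
          | false => rfl
          | true => exact absurd ((PySem.Dict.contains_iff_mem_keys D t).mp h) (by rw [hkeys]; exact hmem)
        have h1 : D.setdefault t (PySem.Dict.mk [("active",0),("total",0)]) = D.insert t (PySem.Dict.mk [("active",0),("total",0)]) :=
          PySem.Dict.setdefault_of_not_contains D _ hcont
        have h2 : (D.insert t (PySem.Dict.mk [("active",0),("total",0)])).modify t (PySem.Dict.mk [("active",0),("total",0)]) (fun item => item.modify "total" 0 (· + 1)) =
            D.insert t (PySem.Dict.mk [("active",0),("total",0+1)]) := by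
          rw [pv_modify_eq, PySem.Dict.getD_insert_self]
          simp only [pv_modify_total]
          rw [PySem.Dict.insert_insert_self]
        have h3 : (D.insert t (PySem.Dict.mk [("active",0),("total",0+1)])).modify t (PySem.Dict.mk [("active",0),("total",0)]) (fun item => item.modify "active" 0 (· + 1)) =
            D.insert t (PySem.Dict.mk [("active",0+1),("total",0+1)]) := by
          rw [pv_modify_eq, PySem.Dict.getD_insert_self]
          simp only [pv_modify_active]
          rw [PySem.Dict.insert_insert_self]
        simp only [hg, if_neg htne]
        rw [h1, h2]
        by_cases hact : (PySem.Dict.mk b : PySem.Dict String String).get? "status" = some "rewarded"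
        · rw [if_neg (by simp [hact])]
          have hactb : pvAct b = false := by simp [pvAct, hact]
          rw [hT', PySem.Set.ofList_append_singleton, PySem.Set.add_of_not_mem hmem]
          apply PySem.Dict.ext
          rw [PySem.Dict.items_insert_of_not_contains D _ hcont]
          show (S.map f) ++ _ = _
          rw [List.map_append]
          congr 1
          · apply List.map_congr_left
            intro x hx
            have hxt : ¬ x = t := fun h => hmem (h ▸ hx)
            simp only [hf, pvF]
            rw [hT', hA', hactb]
            simp [List.count_append, List.count_cons, Ne.symm hxt]
          · simp [hf, pvF, hT', hA', hactb, List.count_append, List.count_eq_zero.mpr hnotin_t, List.count_eq_zero.mpr hnotin_at]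
        · rw [if_pos (by simp [hact])]
          have hactb : pvAct b = true := by simp [pvAct, hact]
          rw [h3]
          rw [hT', PySem.Set.ofList_append_singleton, PySem.Set.add_of_not_mem hmem]
          apply PySem.Dict.ext
          rw [PySem.Dict.items_insert_of_not_contains D _ hcont]
          show (S.map f) ++ _ = _
          rw [List.map_append]
          congr 1
          · apply List.map_congr_left
            intro x hx
            have hxt : ¬ x = t := fun h => hmem (h ▸ hx)
            simp only [hf, pvF]
            rw [hT', hA', hactb]
            simp [List.count_append, List.count_cons, Ne.symm hxt]
          · simp [hf, pvF, hT', hA', hactb, List.count_append, List.count_eq_zero.mpr hnotin_t, List.count_eq_zero.mpr hnotin_at]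

theorem pv_totals_gen (bs : List (List (String × String))) (d : PySem.Dict String Int) :
    bs.foldl (fun totals b =>
      match (PySem.Dict.mk b : PySem.Dict String String).get? "tribeId" with
      | none => totals
      | some tid => if tid = "" then totals else totals.insert tid (totals.getD tid 0 + 1)) d
    = (pvTids bs).foldl (fun d t => d.insert t (d.getD t 0 + 1)) d := by
  induction bs generalizing d with
  | nil => rfl
  | cons b bs ih =>
    simp only [List.foldl_cons, pvTids, List.filterMap_cons]
    cases hb : (PySem.Dict.mk b : PySem.Dict String String).get? "tribeId" with
    | none => simp [pvKeyOf, hb, ih, pvTids]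
    | some t =>
      by_cases ht : t = "" <;> simp [pvKeyOf, hb, ht, ih, pvTids]

theorem pv_actives_gen (bs : List (List (String × String))) (d : PySem.Dict String Int) :
    bs.foldl (fun actives b =>
      let bd : PySem.Dict String String := PySem.Dict.mk b
      match bd.get? "tribeId" with
      | none => actives
      | some tid =>
        if tid = "" then actives
        else if bd.get? "status" ≠ some "rewarded" then actives.insert tid (actives.getD tid 0 + 1)
        else actives) d
    = (pvAtids bs).foldl (fun d t => d.insert t (d.getD t 0 + 1)) d := by
  induction bs generalizing d with
  | nil => rfl
  | cons b bs ih =>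
    cases hb : (PySem.Dict.mk b : PySem.Dict String String).get? "tribeId" with
    | none =>
      simp only [List.foldl_cons, hb]
      rw [ih]
      congr 1
      simp [pvAtids, pvKeyOf, hb]
    | some t =>
      simp only [List.foldl_cons, hb]
      by_cases ht : t = ""
      · rw [if_pos ht, ih]
        congr 1
        simp [pvAtids, pvKeyOf, hb, ht]
      · rw [if_neg ht]
        by_cases ha : (PySem.Dict.mk b : PySem.Dict String String).get? "status" = some "rewarded"
        · rw [if_neg (by simp [ha]), ih]
          congr 1
          simp only [pvAtids, List.filterMap_cons, pvKeyOf, pvAct, hb, ht, ha]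
          simp
        · rw [if_pos (by simp [ha]), ih]
          have hA : pvAtids (b :: bs) = t :: pvAtids bs := by
            simp [pvAtids, pvKeyOf, pvAct, hb, ht, ha]
          rw [hA, List.foldl_cons]

theorem pv_totals_eq_counter (bounties : List (List (String × String))) :
    bounties.foldl (fun totals b =>
      match (PySem.Dict.mk b : PySem.Dict String String).get? "tribeId" with
      | none => totals
      | some tid => if tid = "" then totals else totals.insert tid (totals.getD tid 0 + 1))
      (PySem.Dict.empty : PySem.Dict String Int) = PySem.Dict.counter (pvTids bounties) := by
  rw [pv_totals_gen, PySem.Dict.foldl_insert_getD_add_one_eq_counter]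

theorem pv_actives_eq_counter (bounties : List (List (String × String))) :
    bounties.foldl (fun actives b =>
      let bd : PySem.Dict String String := PySem.Dict.mk b
      match bd.get? "tribeId" with
      | none => actives
      | some tid =>
        if tid = "" then actives
        else if bd.get? "status" ≠ some "rewarded" then actives.insert tid (actives.getD tid 0 + 1)
        else actives)
      (PySem.Dict.empty : PySem.Dict String Int) = PySem.Dict.counter (pvAtids bounties) := by
  rw [pv_actives_gen, PySem.Dict.foldl_insert_getD_add_one_eq_counter]

-- ===== VERDICT (by name: the statement is the Claim_ definition above) =====
theorem tribe_counts_for_bounties_py_spec : Claim_equal_tribe_counts_for_bounties_py := by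
  intro bounties _
  show tribe_counts_for_bounties_py bounties = tribe_counts_for_bounties_py_alt bounties
  unfold tribe_counts_for_bounties_py tribe_counts_for_bounties_py_alt
  simp only []
  rw [pv_totals_eq_counter, pv_actives_eq_counter, pv_A_counts_char]
  simp [PySem.Dict.items_counter, PySem.Dict.getD_counter, List.map_map, Function.comp, pvF,
    PySem.Dict.items]
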